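-- pv_equiv track=rewrite | github.com/qingtang3009/SVM | support_vector_machine.py | creat_words_bag
-- ===== SOURCE A (Python) =====
-- def creat_words_bag(words_counter, min_count=5):
--     """
--     创建一个词袋
--     :param words_counter: 来自于上个函数creat_words_count_dictionary的输出，每个词以及其对应的出现次数（注意：这里的统计的出现次数是相对于整个大文档而言）
--     :param min_count: 最小限制次数，低于min_count则剔除
--     :return: ['单词0':0, '单词1':1, '单词2':2, '单词3':3,......]（注意：这里单词是有排序的，按出现次数从高到低）
--     """
--     words2id = {}
--     index = 0
--     for (key, values) in sorted(words_counter.items(), key=lambda d: d[1], reverse=True):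
--         if values >= min_count:
--             words2id[key] = index
--             index += 1
--         else:
--             break
--     return words2id
-- ===== SOURCE B (Python) =====
-- def creat_words_bag(words_counter, min_count=5):
--     # Bucket words by their count (keeping only counts >= min_count), then walk
--     # the distinct counts from high to low, numbering the words of each bucket.
--     buckets = {}
--     for word, count in words_counter.items():
--         if count >= min_count:
--             buckets[count] = buckets.get(count, []) + [word]
--     words2id = {}
--     index = 0
--     for count in sorted(buckets, reverse=True):
--         for word in buckets[count]:
--             words2id[word] = index
--             index += 1
--     return words2id
-- ===== Notes on version B (the rewrite author's own statement) =====
-- stated objective: alternative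
-- what changed: A sorts all items by count descending and walks them with an early-break id-assigning loop; B never sorts the items: it groups words into count-keyed buckets in one pass, sorts only the distinct counts, and numbers the bucket contents high-to-low (first-occurrence order inside a bucket reproduces stable-sort tie order).
import Mathlib
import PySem

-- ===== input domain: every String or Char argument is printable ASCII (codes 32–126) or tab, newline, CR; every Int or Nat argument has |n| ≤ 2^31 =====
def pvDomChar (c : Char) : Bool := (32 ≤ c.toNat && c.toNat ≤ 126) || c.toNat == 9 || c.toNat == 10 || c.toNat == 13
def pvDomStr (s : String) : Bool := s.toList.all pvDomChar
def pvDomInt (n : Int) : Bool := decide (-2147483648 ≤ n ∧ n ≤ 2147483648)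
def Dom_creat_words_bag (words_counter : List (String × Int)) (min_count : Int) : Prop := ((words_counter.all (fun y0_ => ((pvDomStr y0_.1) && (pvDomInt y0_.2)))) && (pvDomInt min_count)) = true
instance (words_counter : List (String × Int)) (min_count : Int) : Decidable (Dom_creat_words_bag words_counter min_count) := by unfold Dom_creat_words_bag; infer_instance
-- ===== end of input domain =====

-- B replaces A's sort-all-items-then-break loop by count-keyed buckets: group words by count in one pass, sort only the distinct counts, number the buckets high-to-low (return value proved equal).


-- ===== PORT A =====
-- A's loop: walk the descending-sorted items, assign ids while count >= min_count, break otherwise.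
def cwbLoop (min_count : Int) : List (String × Int) → Int → PySem.Dict String Int → PySem.Dict String Int
  | [], _, d => d
  | (k, v) :: rest, idx, d =>
      if min_count ≤ v then cwbLoop min_count rest (idx + 1) (d.insert k idx) else d

def creat_words_bag (words_counter : List (String × Int)) (min_count : Int) : List (String × Int) :=
  (cwbLoop min_count (PySem.List.sorted words_counter (fun p => p.2) true) 0 PySem.Dict.empty).items

-- ===== PORT B =====
-- Source B: buckets[count] = buckets.get(count, []) + [word]  (= Dict.modify count [] (· ++ [word]));
-- then for count in sorted(buckets, reverse=True): for word in buckets[count]: assign ids.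
-- (buckets[count] in the second loop is ported as getD count []; the key is always present there.)
def cwbBuckets (words_counter : List (String × Int)) (min_count : Int) : PySem.Dict Int (List String) :=
  words_counter.foldl
    (fun b p => if min_count ≤ p.2 then b.modify p.2 [] (fun ws => ws ++ [p.1]) else b)
    PySem.Dict.empty

def creat_words_bag_alt (words_counter : List (String × Int)) (min_count : Int) : List (String × Int) :=
  ((PySem.List.sorted (cwbBuckets words_counter min_count).keys (fun c => c) true).foldl
      (fun (st : PySem.Dict String Int × Int) c =>
        ((cwbBuckets words_counter min_count).getD c []).foldl
          (fun st w => (st.1.insert w st.2, st.2 + 1)) st)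
      (PySem.Dict.empty, 0)).1.items

-- ===== PRECONDITION & SPEC =====
def Spec_creat_words_bag (words_counter : List (String × Int)) (min_count : Int) (out : List (String × Int)) : Prop := out = creat_words_bag_alt words_counter min_count
instance (words_counter : List (String × Int)) (min_count : Int) (out : List (String × Int)) : Decidable (Spec_creat_words_bag words_counter min_count out) := by unfold Spec_creat_words_bag; infer_instance

-- ===== CLAIM (what is proved, stated in full; the proofs are below) =====
def Claim_equal_creat_words_bag : Prop := ∀ (words_counter : List (String × Int)) (min_count : Int), Dom_creat_words_bag words_counter min_count → Spec_creat_words_bag words_counter min_count (creat_words_bag words_counter min_count)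

-- ===== LEMMAS AND PROOFS =====

-- insertBy with the descending comparison preserves a descending-sorted list
lemma insertBy_pairwise_desc (x : String × Int) (ys : List (String × Int))
    (h : ys.Pairwise (fun a b => b.2 ≤ a.2)) :
    (PySem.List.insertBy (fun a b => decide (b.2 < a.2)) x ys).Pairwise (fun a b => b.2 ≤ a.2) := by
  induction ys with
  | nil => simp [PySem.List.insertBy]
  | cons y ys ih =>
    rcases List.pairwise_cons.mp h with ⟨hy, ht⟩
    simp only [PySem.List.insertBy]
    by_cases hlt : y.2 < x.2
    · simp only [hlt, decide_true, if_true]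
      refine List.pairwise_cons.mpr ⟨?_, h⟩
      intro z hz
      rcases List.mem_cons.mp hz with hz | hz
      · exact le_of_lt (hz ▸ hlt)
      · exact le_trans (hy z hz) (le_of_lt hlt)
    · simp only [hlt, decide_false, Bool.false_eq_true, if_false]
      refine List.pairwise_cons.mpr ⟨?_, ih ht⟩
      intro z hz
      rcases (PySem.List.mem_insertBy _ _ _ _).mp hz with hz | hz
      · exact hz ▸ (not_lt.mp hlt)
      · exact hy z hz

-- inserting into a descending-sorted list appends to the slice of any fixed key
lemma filter_key_insertBy (c : Int) (x : String × Int) (ys : List (String × Int))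
    (h : ys.Pairwise (fun a b => b.2 ≤ a.2)) :
    (PySem.List.insertBy (fun a b => decide (b.2 < a.2)) x ys).filter (fun p => p.2 == c)
      = if x.2 = c then ys.filter (fun p => p.2 == c) ++ [x] else ys.filter (fun p => p.2 == c) := by
  induction ys with
  | nil => by_cases hx : x.2 = c <;> simp [PySem.List.insertBy, List.filter, hx]
  | cons y ys ih =>
    rcases List.pairwise_cons.mp h with ⟨hy, ht⟩
    simp only [PySem.List.insertBy]
    by_cases hlt : y.2 < x.2
    · simp only [hlt, decide_true, if_true]
      by_cases hx : x.2 = c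
      · -- every key in y :: ys is ≤ y.2 < x.2 = c, so the slice of y :: ys is empty
        have hall : (y :: ys).filter (fun p => p.2 == c) = [] := by
          apply List.filter_eq_nil_iff.mpr
          intro z hz
          rcases List.mem_cons.mp hz with hz | hz
          · subst hz; simp; omega
          · have := hy z hz; simp; omega
        simp [hx, hall]
      · simp [List.filter_cons, hx]
    · simp only [hlt, decide_false, Bool.false_eq_true, if_false]
      by_cases hyc : y.2 = c <;> by_cases hx : x.2 = c <;>
        simp [hyc, hx, ih ht]

-- the stable descending sort preserves each fixed-key slice
lemma filter_key_sorted (c : Int) (L : List (String × Int)) :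
    (PySem.List.sorted L (fun p => p.2) true).filter (fun p => p.2 == c)
      = L.filter (fun p => p.2 == c) := by
  rw [PySem.List.sorted_rev_eq_foldl_insertBy]
  have main : ∀ (l acc : List (String × Int)), acc.Pairwise (fun a b => b.2 ≤ a.2) →
      (l.foldl (fun acc x => PySem.List.insertBy (fun a b => decide ((fun p : String × Int => p.2) b < (fun p : String × Int => p.2) a)) x acc) acc).filter (fun p => p.2 == c)
        = acc.filter (fun p => p.2 == c) ++ l.filter (fun p => p.2 == c) := by
    intro l
    induction l with
    | nil => intro acc _; simp
    | cons x l ih =>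
      intro acc hacc
      rw [List.foldl_cons, ih _ (insertBy_pairwise_desc x acc hacc),
        filter_key_insertBy c x acc hacc]
      by_cases hx : x.2 = c <;> simp [hx]
  simpa using main L [] (by simp)

-- a descending-sorted list is determined by its fixed-key slices
lemma eq_of_pairwise_desc_of_filters (P Q : List (String × Int))
    (hP : P.Pairwise (fun a b => b.2 ≤ a.2)) (hQ : Q.Pairwise (fun a b => b.2 ≤ a.2))
    (h : ∀ c : Int, P.filter (fun p => p.2 == c) = Q.filter (fun p => p.2 == c)) : P = Q := by
  induction P generalizing Q with
  | nil =>
    cases Q with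
    | nil => rfl
    | cons q Q' =>
      have h1 := h q.2
      simp at h1
  | cons p P' ih =>
    cases Q with
    | nil =>
      have h1 := h p.2
      simp at h1
    | cons q Q' =>
      rcases List.pairwise_cons.mp hP with ⟨hp, hP'⟩
      rcases List.pairwise_cons.mp hQ with ⟨hq, hQ'⟩
      have hpq : p.2 = q.2 := by
        have hmem1 : p ∈ (q :: Q').filter (fun r => r.2 == p.2) := by
          rw [← h p.2]; simp
        have hple : p.2 ≤ q.2 := by
          rcases List.mem_cons.mp (List.mem_filter.mp hmem1).1 with hz | hz
          · rw [hz]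
          · exact hq _ hz
        have hmem2 : q ∈ (p :: P').filter (fun r => r.2 == q.2) := by
          rw [h q.2]; simp
        have hqle : q.2 ≤ p.2 := by
          rcases List.mem_cons.mp (List.mem_filter.mp hmem2).1 with hz | hz
          · rw [hz]
          · exact hp _ hz
        omega
      have h1 := h p.2
      simp only [List.filter_cons, beq_self_eq_true, if_true, hpq] at h1
      obtain ⟨hpq2, htail⟩ := List.cons_eq_cons.mp h1
      rw [hpq2]
      congr 1
      apply ih Q' hP' hQ'
      intro c
      by_cases hc : c = q.2
      · rw [hc]; exact htail
      · have hz := h c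
        have hqc : (q.2 == c) = false := by simp; omega
        have hpc : (p.2 == c) = false := by simp; omega
        simpa [List.filter_cons, hqc, hpc] using hz


-- the bucket concatenation over strictly descending counts is descending-sorted
lemma flatMap_filter_pairwise_desc (F : List (String × Int)) (ks : List Int)
    (hks : ks.Pairwise (fun a b => b < a)) :
    (ks.flatMap (fun c => F.filter (fun p => p.2 == c))).Pairwise (fun a b => b.2 ≤ a.2) := by
  induction ks with
  | nil => simp
  | cons k ks ih =>
    rcases List.pairwise_cons.mp hks with ⟨hk, hks'⟩
    rw [List.flatMap_cons]
    apply List.pairwise_append.mpr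
    refine ⟨?_, ih hks', ?_⟩
    · apply List.pairwise_of_forall_mem_list
      intro a ha b hb
      have ha' := (List.mem_filter.mp ha).2
      have hb' := (List.mem_filter.mp hb).2
      simp at ha' hb'
      omega
    · intro a ha b hb
      have ha' := (List.mem_filter.mp ha).2
      rcases List.mem_flatMap.mp hb with ⟨c', hc', hb'⟩
      have hb'' := (List.mem_filter.mp hb').2
      have := hk c' hc'
      simp at ha' hb''
      omega

-- fixed-key slices of the bucket concatenation
lemma filter_key_flatMap (F : List (String × Int)) (ks : List Int) (hnd : ks.Nodup) (c : Int) :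
    (ks.flatMap (fun c' => F.filter (fun p => p.2 == c'))).filter (fun p => p.2 == c)
      = if c ∈ ks then F.filter (fun p => p.2 == c) else [] := by
  induction ks with
  | nil => simp
  | cons k ks ih =>
    rcases List.nodup_cons.mp hnd with ⟨hknot, hnd'⟩
    rw [List.flatMap_cons, List.filter_append, ih hnd']
    by_cases hc : c = k
    · subst hc
      have hnot : c ∉ ks := hknot
      simp only [hnot, if_false, List.mem_cons, true_or, if_true, List.append_nil]
      rw [List.filter_filter]
      simp
    · have hhead : (F.filter (fun p => p.2 == k)).filter (fun p => p.2 == c) = [] := by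
        apply List.filter_eq_nil_iff.mpr
        intro a ha
        have := (List.mem_filter.mp ha).2
        simp at this ⊢
        omega
      rw [hhead]
      by_cases hmem : c ∈ ks <;> simp [hmem, hc]

-- a nested per-bucket fold is the fold over the concatenation
lemma foldl_foldl_eq_foldl_flatMap {α β γ : Type} (ks : List γ) (g : γ → List β)
    (h : α → β → α) (init : α) :
    ks.foldl (fun st c => (g c).foldl h st) init = (ks.flatMap g).foldl h init := by
  induction ks generalizing init with
  | nil => simp
  | cons c ks ih => simp [List.foldl_append, ih]

-- the fold carrying (dict, next id) is the fold over enumerate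
lemma foldl_idx_eq_enumerate (ws : List String) (d : PySem.Dict String Int) (i : Int) :
    (ws.foldl (fun st w => (st.1.insert w st.2, st.2 + 1)) (d, i)).1
      = (PySem.List.enumerate ws i).foldl (fun d pr => d.insert pr.2 pr.1) d := by
  induction ws generalizing d i with
  | nil => simp [PySem.List.enumerate]
  | cons w ws ih => simp [PySem.List.enumerate, ih]

lemma enumerate_map {α β : Type} (f : α → β) (l : List α) (i : Int) :
    PySem.List.enumerate (l.map f) i = (PySem.List.enumerate l i).map (fun p => (p.1, f p.2)) := by
  induction l generalizing i with
  | nil => simp [PySem.List.enumerate]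
  | cons x l ih => simp [PySem.List.enumerate, ih]

-- on a descending-sorted list, A's break-loop is the fold over the enumerated filtered list
lemma cwbLoop_eq_foldl_enumerate (min_count : Int) (s : List (String × Int))
    (h : s.Pairwise (fun a b => b.2 ≤ a.2)) :
    ∀ (i : Int) (d : PySem.Dict String Int),
      cwbLoop min_count s i d
        = (PySem.List.enumerate (s.filter (fun z => decide (min_count ≤ z.2))) i).foldl
            (fun d pr => d.insert pr.2.1 pr.1) d := by
  induction s with
  | nil => intro i d; simp [cwbLoop]
  | cons x s ih =>
    rcases List.pairwise_cons.mp h with ⟨hx, ht⟩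
    intro i d
    obtain ⟨k, v⟩ := x
    by_cases hv : min_count ≤ v
    · simp only [cwbLoop, hv, if_true, List.filter, decide_true, PySem.List.enumerate, List.foldl_cons]
      exact ih ht (i + 1) (d.insert k i)
    · have hall : ((k, v) :: s).filter (fun z => decide (min_count ≤ z.2)) = [] := by
        apply List.filter_eq_nil_iff.mpr
        intro z hz
        rcases List.mem_cons.mp hz with hz | hz
        · simp [hz]; omega
        · have := hx z hz
          simp at this ⊢
          omega
      simp only [cwbLoop, hv, if_false]
      rw [hall]
      simp [PySem.List.enumerate]

-- a foldl whose body is guarded by `if` is the foldl over the filtered list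
lemma foldl_guard_eq_foldl_filter {α β : Type} (p : β → Prop) [DecidablePred p]
    (f : α → β → α) (l : List β) (init : α) :
    l.foldl (fun a b => if p b then f a b else a) init
      = (l.filter (fun b => decide (p b))).foldl f init := by
  induction l generalizing init with
  | nil => rfl
  | cons x l ih => by_cases hx : p x <;> simp [hx, ih]

-- ===== VERDICT (by name: the statement is the Claim_ definition above) =====
theorem creat_words_bag_spec : Claim_equal_creat_words_bag := by
  intro L m _
  unfold Spec_creat_words_bag creat_words_bag creat_words_bag_alt
  -- names for the pieces
  set F : List (String × Int) := L.filter (fun p => decide (m ≤ p.2)) with hF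
  have hguard := foldl_guard_eq_foldl_filter (fun p : String × Int => m ≤ p.2)
      (fun b p => b.modify p.2 [] (fun ws => ws ++ [p.1])) L (PySem.Dict.empty (κ := Int) (ν := List String))
  set buckets : PySem.Dict Int (List String) := cwbBuckets L m with hbuckets
  have hbf : buckets = F.foldl (fun b p => b.modify p.2 [] (fun ws => ws ++ [p.1])) PySem.Dict.empty := by
    rw [hbuckets]; exact hguard
  -- bucket contents
  have hgetD : ∀ c : Int, buckets.getD c [] = (F.filter (fun p => p.2 == c)).map (fun p => p.1) := by
    intro c
    rw [hbf, show F.foldl (fun b p => b.modify p.2 [] (fun ws => ws ++ [p.1])) PySem.Dict.empty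
        = (F.map (fun p => (p.2, p.1))).foldl (fun d q => d.modify q.1 [] (fun ws => ws ++ [q.2]))
            PySem.Dict.empty from by rw [List.foldl_map],
      PySem.Dict.getD_foldl_modify_append]
    simp [List.filter_map, Function.comp_def]
  -- bucket keys
  have hkeys : buckets.keys = PySem.Set.ofList (F.map (fun p => p.2)) := by
    rw [hbf, PySem.Dict.keys_foldl_modify_key F (fun p => p.2) [] (fun _ p => (fun ws => ws ++ [p.1])),
      PySem.Dict.keys_empty]
    exact PySem.Set.update_empty _
  have hkeysnd : buckets.keys.Nodup := by
    rw [hkeys]; exact PySem.Set.nodup_ofList _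
  set ks : List Int := PySem.List.sorted buckets.keys (fun c => c) true with hks
  have hksnd : ks.Nodup := (PySem.List.sorted_perm buckets.keys (fun c => c) true).nodup_iff.mpr hkeysnd
  have hksdesc : ks.Pairwise (fun a b => b ≤ a) := PySem.List.sorted_pairwise_rev buckets.keys (fun c => c)
  have hksstrict : ks.Pairwise (fun a b => b < a) :=
    (hksdesc.and hksnd).imp (fun hab => lt_of_le_of_ne hab.1 hab.2.symm)
  have hmemks : ∀ c : Int, c ∈ ks ↔ c ∈ F.map (fun p => p.2) := by
    intro c
    rw [hks, PySem.List.mem_sorted, hkeys, PySem.Set.mem_ofList]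
  -- the two word orders coincide
  have hmain : (PySem.List.sorted L (fun p => p.2) true).filter (fun z => decide (m ≤ z.2))
      = ks.flatMap (fun c => F.filter (fun p => p.2 == c)) := by
    apply eq_of_pairwise_desc_of_filters
    · exact (PySem.List.sorted_pairwise_rev L (fun p => p.2)).filter _
    · exact flatMap_filter_pairwise_desc F ks hksstrict
    · intro c
      rw [filter_key_flatMap F ks hksnd c]
      have hleft : ((PySem.List.sorted L (fun p => p.2) true).filter (fun z => decide (m ≤ z.2))).filter
          (fun p => p.2 == c) = F.filter (fun p => p.2 == c) := by
        rw [List.filter_filter, hF, List.filter_filter]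
        rw [show (fun (p : String × Int) => p.2 == c && decide (m ≤ p.2))
            = (fun (p : String × Int) => decide (m ≤ p.2) && (p.2 == c)) from by
          funext p; exact Bool.and_comm _ _]
        rw [← List.filter_filter, ← List.filter_filter, filter_key_sorted]
      rw [hleft]
      by_cases hmem : c ∈ ks
      · rw [if_pos hmem]
      · rw [if_neg hmem]
        apply List.filter_eq_nil_iff.mpr
        intro a ha hc
        apply hmem
        rw [hmemks]
        exact List.mem_map.mpr ⟨a, ha, by simpa using hc⟩
  -- A's side: break-loop = fold over the enumerated filtered sorted list
  rw [cwbLoop_eq_foldl_enumerate m _ (PySem.List.sorted_pairwise_rev L (fun p => p.2)) 0 PySem.Dict.empty]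
  -- B's side: nested fold = fold over the bucket concatenation with running index
  rw [foldl_foldl_eq_foldl_flatMap]
  simp only [hgetD]
  rw [show (ks.flatMap fun c => (F.filter (fun p => p.2 == c)).map (fun p => p.1))
      = (ks.flatMap fun c => F.filter (fun p => p.2 == c)).map (fun p => p.1) from by
    rw [List.map_flatMap]]
  rw [foldl_idx_eq_enumerate, enumerate_map, List.foldl_map, hmain]
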